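-- pv_equiv track=rewrite | github.com/anna-lcg/AdventOfCode | 2024/Day_01/Day_01.py | Part2
-- ===== SOURCE A (Python) =====
-- def Part2(SourceA,SourceB):
--     multlist=[]
--     for itemA in SourceA:
--         quant=0
--         if itemA in SourceB:
--             for itemB in SourceB:
--                 if itemB==itemA:
--                     quant+=1
--         multlist.append(itemA*quant)
--     return(sum(multlist))
-- ===== SOURCE B (Python) =====
-- def Part2(SourceA, SourceB):
--     countA = {}
--     for x in SourceA:
--         countA[x] = countA.get(x, 0) + 1
--     countB = {}
--     for x in SourceB:
--         countB[x] = countB.get(x, 0) + 1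
--     total = 0
--     for value, na in countA.items():
--         total += value * na * countB.get(value, 0)
--     return total
-- ===== Notes on version B (the rewrite author's own statement) =====
-- stated objective: faster
-- what changed: Instead of scanning SourceB (twice: membership test plus counting loop) for every element of SourceA, B builds one frequency table per list and accumulates value*countA*countB over the unique keys of SourceA, removing the inner scans.
import Mathlib
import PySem

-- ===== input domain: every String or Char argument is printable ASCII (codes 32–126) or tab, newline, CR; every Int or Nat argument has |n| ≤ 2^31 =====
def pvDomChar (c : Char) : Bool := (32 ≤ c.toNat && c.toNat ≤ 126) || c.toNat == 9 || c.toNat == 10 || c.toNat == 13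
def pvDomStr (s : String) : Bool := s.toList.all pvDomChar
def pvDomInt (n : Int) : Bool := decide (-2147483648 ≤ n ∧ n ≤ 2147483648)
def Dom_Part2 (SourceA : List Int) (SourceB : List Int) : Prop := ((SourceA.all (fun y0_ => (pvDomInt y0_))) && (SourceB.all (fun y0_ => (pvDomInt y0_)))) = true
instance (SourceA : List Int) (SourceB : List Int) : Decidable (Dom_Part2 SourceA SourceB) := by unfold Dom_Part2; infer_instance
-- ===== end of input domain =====

-- B replaces A's per-element rescan of SourceB by two frequency tables combined
-- in one pass over SourceA's unique keys (objective: faster, O(n+m) vs O(n*m)).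

-- ===== PORT A =====
def Part2 (SourceA : List Int) (SourceB : List Int) : Int :=
  let multlist : List Int :=
    SourceA.foldl (fun ml itemA =>
      let quant : Int :=
        if SourceB.contains itemA then
          SourceB.foldl (fun q itemB => if itemB == itemA then q + 1 else q) 0
        else 0
      ml ++ [itemA * quant]) []
  multlist.sum

-- ===== PORT B =====
def Part2_alt (SourceA : List Int) (SourceB : List Int) : Int :=
  let countA := SourceA.foldl (fun d x => d.insert x (d.getD x 0 + 1)) (PySem.Dict.empty : PySem.Dict Int Int)
  let countB := SourceB.foldl (fun d x => d.insert x (d.getD x 0 + 1)) (PySem.Dict.empty : PySem.Dict Int Int)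
  countA.items.foldl (fun total p => total + p.1 * p.2 * countB.getD p.1 0) 0

-- ===== PRECONDITION & SPEC =====
def Spec_Part2 (SourceA : List Int) (SourceB : List Int) (out : Int) : Prop := out = Part2_alt SourceA SourceB
instance (SourceA : List Int) (SourceB : List Int) (out : Int) : Decidable (Spec_Part2 SourceA SourceB out) := by unfold Spec_Part2; infer_instance

-- ===== CLAIM (what is proved, stated in full; the proofs are below) =====
def Claim_equal_Part2 : Prop := ∀ (SourceA : List Int) (SourceB : List Int), Dom_Part2 SourceA SourceB → Spec_Part2 SourceA SourceB (Part2 SourceA SourceB)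

-- ===== LEMMAS AND PROOFS =====

-- inner counting loop of A
theorem pv_inner_count (B : List Int) (a : Int) (q : Int) :
    B.foldl (fun q itemB => if itemB == a then q + 1 else q) q = q + (B.count a : Int) := by
  induction B generalizing q with
  | nil => simp
  | cons b t ih =>
    rw [List.foldl_cons]
    by_cases h : b = a
    · subst h
      rw [if_pos (by simp), ih, List.count_cons_self]
      push_cast
      ring
    · rw [if_neg (by simp [h]), ih]
      simp [List.count_cons, h]

-- A's quant (with its redundant membership guard) is just the count
theorem pv_quant_eq (B : List Int) (a : Int) :
    (if B.contains a then B.foldl (fun q itemB => if itemB == a then q + 1 else q) 0 else 0)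
      = (B.count a : Int) := by
  by_cases h : a ∈ B
  · have hc : B.contains a = true := by simpa using h
    rw [hc, if_pos rfl, pv_inner_count]
    simp
  · simp [h, List.count_eq_zero_of_not_mem h]

-- A computes the sum of the per-element products
theorem pv_A_eq (A B : List Int) :
    Part2 A B = (A.map (fun a => a * (B.count a : Int))).sum := by
  unfold Part2
  simp only [PySem.List.foldl_append_singleton_eq_map (f := fun itemA =>
    itemA * (if B.contains itemA then B.foldl (fun q itemB => if itemB == itemA then q + 1 else q) 0 else 0))]
  simp only [pv_quant_eq, List.nil_append]

-- B computes the grouped sum over SourceA's distinct values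
theorem pv_B_eq (A B : List Int) :
    Part2_alt A B = ((PySem.Set.ofList A).map (fun k => k * (A.count k : Int) * (B.count k : Int))).sum := by
  unfold Part2_alt
  simp only [PySem.Dict.foldl_insert_getD_add_one_eq_counter, PySem.Dict.items_counter,
    PySem.Dict.getD_counter, PySem.List.foldl_add (g := fun p : Int × Int => p.1 * p.2 * (B.count p.1 : Int))]
  simp [List.map_map, Function.comp_def]

-- grouping: the elementwise sum equals the sum over distinct values weighted by multiplicity
theorem pv_group (A B : List Int) :
    (A.map (fun a => a * (B.count a : Int))).sum
      = ((PySem.Set.ofList A).map (fun k => k * (A.count k : Int) * (B.count k : Int))).sum := by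
  rw [Finset.sum_list_map_count A (fun a => a * (B.count a : Int))]
  rw [← List.sum_toFinset _ (PySem.Set.nodup_ofList A)]
  have hset : (PySem.Set.ofList A).toFinset = A.toFinset := by
    apply Finset.ext
    intro x
    simp [List.mem_toFinset, PySem.Set.mem_ofList]
  rw [hset]
  apply Finset.sum_congr rfl
  intro k _
  push_cast
  ring

-- ===== VERDICT (by name: the statement is the Claim_ definition above) =====
theorem Part2_spec : Claim_equal_Part2 := by
  intro A B _
  unfold Spec_Part2
  rw [pv_A_eq, pv_B_eq, pv_group]
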